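-- pv_equiv track=rewrite | github.com/KhangTran2503/Competitive-Programming | HackerRank/Python/Xor_Sequence.py | calc
-- ===== SOURCE A (Python) =====
-- def calc(x) :
--
--     res = 0
--     if (x % 2 == 0) :
--         x //= 2
--         u = (x // 4) * 4
--         for i in range(u, u + (x % 4) + 1, 1) :
--             res ^= (2*i)
--     else :
--         u = x - 1
--         u //= 2
--         _u = (u // 4) * 4
--         for i in range(_u, _u + (u % 4) + 1, 1) :
--             res ^= (2*i + 1)
--
--     return res
-- ===== SOURCE B (Python) =====
-- def _g(n):
--     # cumulative XOR 0^1^...^n pattern (also valid for the partial block A scans)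
--     r = n % 4
--     if r == 0:
--         return n
--     if r == 1:
--         return 1
--     if r == 2:
--         return n + 1
--     return 0
--
--
-- def calc(x):
--     if x % 2 == 0:
--         return 2 * _g(x // 2)
--     u = (x - 1) // 2
--     return 2 * _g(u) + (u % 4 + 1) % 2
-- ===== Notes on version B (the rewrite author's own statement) =====
-- stated objective: simpler
-- what changed: Replaced A's per-branch XOR accumulation loop over the trailing block of the range with the closed-form cumulative-XOR table g(n)=[n,1,n+1,0][n%4], doubling it for even x and adding the parity bit for odd x.
import Mathlib
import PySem

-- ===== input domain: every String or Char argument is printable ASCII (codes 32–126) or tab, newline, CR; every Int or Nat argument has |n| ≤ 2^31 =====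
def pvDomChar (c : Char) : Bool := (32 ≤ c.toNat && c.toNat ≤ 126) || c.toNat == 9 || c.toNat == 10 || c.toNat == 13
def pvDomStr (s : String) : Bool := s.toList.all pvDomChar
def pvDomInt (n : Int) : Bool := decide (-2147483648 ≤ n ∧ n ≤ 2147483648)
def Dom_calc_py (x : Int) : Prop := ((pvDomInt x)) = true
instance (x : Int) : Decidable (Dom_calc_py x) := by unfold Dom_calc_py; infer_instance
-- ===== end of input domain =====

-- B replaces A's partial-block XOR loop by the closed form for cumulative XOR (simpler, loop-free).

-- ===== PORT A =====
def calc_py (x : Int) : Int :=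
  if PySem.Int.mod x 2 = 0 then
    let x' := PySem.Int.floordiv x 2
    let u := (PySem.Int.floordiv x' 4) * 4
    (PySem.List.pyRange u (u + PySem.Int.mod x' 4 + 1) 1).foldl
      (fun res i => PySem.Int.bxor res (2 * i)) 0
  else
    let u := PySem.Int.floordiv (x - 1) 2
    let v := (PySem.Int.floordiv u 4) * 4
    (PySem.List.pyRange v (v + PySem.Int.mod u 4 + 1) 1).foldl
      (fun res i => PySem.Int.bxor res (2 * i + 1)) 0

-- ===== PORT B =====
-- _g(n) = cumulative-XOR pattern [n, 1, n+1, 0][n % 4]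
def pv_g (n : Int) : Int :=
  let r := PySem.Int.mod n 4
  if r = 0 then n
  else if r = 1 then 1
  else if r = 2 then n + 1
  else 0

def calc_py_alt (x : Int) : Int :=
  if PySem.Int.mod x 2 = 0 then
    2 * pv_g (PySem.Int.floordiv x 2)
  else
    let u := PySem.Int.floordiv (x - 1) 2
    2 * pv_g u + PySem.Int.mod (PySem.Int.mod u 4 + 1) 2

-- ===== PRECONDITION & SPEC =====
def Spec_calc_py (x : Int) (out : Int) : Prop := out = calc_py_alt x
instance (x : Int) (out : Int) : Decidable (Spec_calc_py x out) := by unfold Spec_calc_py; infer_instance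

-- ===== CLAIM (what is proved, stated in full; the proofs are below) =====
def Claim_equal_calc_py : Prop := ∀ (x : Int), Dom_calc_py x → Spec_calc_py x (calc_py x)

-- ===== LEMMAS AND PROOFS =====

-- Nat-level bit lemma: xor on (2a+bit, 2b+bit)
theorem pv_bit_xor (a b : Nat) (x y : Bool) :
    (2 * a + x.toNat) ^^^ (2 * b + y.toNat) = 2 * (a ^^^ b) + (x != y).toNat := by
  have h := Nat.xor_bit x a y b
  cases x <;> cases y <;> simpa [Nat.bit] using h

theorem pvX1 (n : Nat) : (4 * n) ^^^ (4 * n + 1) = 1 := by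
  have h := pv_bit_xor (2 * n) (2 * n) false true
  simp [Nat.xor_self] at h
  have e : 2 * (2 * n) = 4 * n := by ring
  rwa [e] at h

theorem pvX2 (n : Nat) : (4 * n + 2) ^^^ (4 * n + 3) = 1 := by
  have h := pv_bit_xor (2 * n + 1) (2 * n + 1) false true
  simp [Nat.xor_self] at h
  have e : 4 * n + 2 + 1 = 4 * n + 3 := by omega
  rw [show 2 * (2 * n + 1) = 4 * n + 2 by ring] at h
  rwa [e] at h

theorem pvX0 (n : Nat) : 1 ^^^ (4 * n + 1) = 4 * n := by
  have h := pv_bit_xor 0 (2 * n) true true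
  simp at h
  have e : 2 * (2 * n) + 1 = 4 * n + 1 := by ring
  have e' : 2 * (2 * n) = 4 * n := by ring
  rw [e, e'] at h
  simpa using h

theorem pvX3 (n : Nat) : 1 ^^^ (4 * n + 2) = 4 * n + 3 := by
  have h := pv_bit_xor 0 (2 * n + 1) true false
  simp at h
  have e : 2 * (2 * n + 1) = 4 * n + 2 := by ring
  have e' : 2 * (2 * n + 1) + 1 = 4 * n + 3 := by ring
  rw [e] at h
  simpa [e'] using h

-- level-8 Nat identities
theorem pvN1 (n : Nat) : (8 * n) ^^^ (8 * n + 2) = 2 := by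
  have h := pv_bit_xor (4 * n) (4 * n + 1) false false
  simp [pvX1] at h
  have e : 2 * (4 * n) = 8 * n := by ring
  have e' : 2 * (4 * n + 1) = 8 * n + 2 := by ring
  rw [e, e'] at h; simpa using h

theorem pvN6 (n : Nat) : (8 * n + 7) ^^^ (8 * n + 5) = 2 := by
  have h := pv_bit_xor (4 * n + 3) (4 * n + 2) true true
  rw [Nat.xor_comm (4 * n + 3)] at h
  simp [pvX2] at h
  have e : 2 * (4 * n + 3) + 1 = 8 * n + 7 := by ring
  have e' : 2 * (4 * n + 2) + 1 = 8 * n + 5 := by ring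
  rw [e, e'] at h; simpa using h

theorem pvN2 (n : Nat) : 2 ^^^ (8 * n + 4) = 8 * n + 6 := by
  have h := pv_bit_xor 1 (4 * n + 2) false false
  simp [pvX3] at h
  have e : 2 * (4 * n + 2) = 8 * n + 4 := by ring
  have e' : 2 * (4 * n + 3) = 8 * n + 6 := by ring
  rw [e, e'] at h; simpa using h

theorem pvN5 (n : Nat) : 2 ^^^ (8 * n + 3) = 8 * n + 1 := by
  have h := pv_bit_xor 1 (4 * n + 1) false true
  simp [pvX0] at h
  have e : 2 * (4 * n + 1) + 1 = 8 * n + 3 := by ring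
  have e' : 2 * (4 * n) + 1 = 8 * n + 1 := by ring
  rw [e, e'] at h; simpa using h

theorem pvN3 (n : Nat) : (8 * n + 1) ^^^ (8 * n + 3) = 2 := by
  have h := pv_bit_xor (4 * n) (4 * n + 1) true true
  simp [pvX1] at h
  have e : 2 * (4 * n) + 1 = 8 * n + 1 := by ring
  have e' : 2 * (4 * n + 1) + 1 = 8 * n + 3 := by ring
  rw [e, e'] at h; simpa using h

theorem pvN8 (n : Nat) : (8 * n + 6) ^^^ (8 * n + 4) = 2 := by
  have h := pv_bit_xor (4 * n + 3) (4 * n + 2) false false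
  rw [Nat.xor_comm (4 * n + 3)] at h
  simp [pvX2] at h
  have e : 2 * (4 * n + 3) = 8 * n + 6 := by ring
  have e' : 2 * (4 * n + 2) = 8 * n + 4 := by ring
  rw [e, e'] at h; simpa using h

theorem pvN4 (n : Nat) : 2 ^^^ (8 * n + 5) = 8 * n + 7 := by
  have h := pv_bit_xor 1 (4 * n + 2) false true
  simp [pvX3] at h
  have e : 2 * (4 * n + 2) + 1 = 8 * n + 5 := by ring
  have e' : 2 * (4 * n + 3) + 1 = 8 * n + 7 := by ring
  rw [e, e'] at h; simpa using h

theorem pvN7 (n : Nat) : 2 ^^^ (8 * n + 2) = 8 * n := by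
  have h := pv_bit_xor 1 (4 * n + 1) false false
  simp [pvX0] at h
  have e : 2 * (4 * n + 1) = 8 * n + 2 := by ring
  have e' : 2 * (4 * n) = 8 * n := by ring
  rw [e, e'] at h; simpa using h

theorem pv_zero_bxor (a : Int) : PySem.Int.bxor 0 a = a := by
  rw [PySem.Int.bxor_comm, PySem.Int.bxor_zero]

-- Int-level identities used to collapse A's xor chains
theorem pvI1 (k : Int) : PySem.Int.bxor (8 * k) (8 * k + 2) = 2 := by
  by_cases hk : 0 ≤ k
  · obtain ⟨n, rfl⟩ : ∃ n : Nat, k = (n : Int) := ⟨k.toNat, by omega⟩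
    have e1 : (8 * (n : Int)) = ((8 * n : Nat) : Int) := by push_cast; ring
    have e2 : (8 * (n : Int) + 2) = ((8 * n + 2 : Nat) : Int) := by push_cast; ring
    rw [e2, e1, PySem.Int.bxor_natCast, pvN1]
    norm_num
  · obtain ⟨m, rfl⟩ : ∃ m : Nat, k = -((m : Int) + 1) := ⟨(-k - 1).toNat, by omega⟩
    unfold PySem.Int.bxor
    rw [if_neg (by omega), if_neg (by omega)]
    have e1 : (-(8 * -((m : Int) + 1)) - 1).toNat = 8 * m + 7 := by omega
    have e2 : (-(8 * -((m : Int) + 1) + 2) - 1).toNat = 8 * m + 5 := by omega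
    rw [e1, e2, pvN6]
    norm_num

theorem pvI2 (k : Int) : PySem.Int.bxor 2 (8 * k + 4) = 8 * k + 6 := by
  by_cases hk : 0 ≤ k
  · obtain ⟨n, rfl⟩ : ∃ n : Nat, k = (n : Int) := ⟨k.toNat, by omega⟩
    have e1 : (2 : Int) = ((2 : Nat) : Int) := by norm_num
    have e2 : (8 * (n : Int) + 4) = ((8 * n + 4 : Nat) : Int) := by push_cast; ring
    rw [e2, e1, PySem.Int.bxor_natCast, pvN2]; push_cast; ring
  · obtain ⟨m, rfl⟩ : ∃ m : Nat, k = -((m : Int) + 1) := ⟨(-k - 1).toNat, by omega⟩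
    unfold PySem.Int.bxor
    rw [if_pos (by omega), if_neg (by omega)]
    have e1 : (2 : Int).toNat = 2 := by decide
    have e2 : (-(8 * -((m : Int) + 1) + 4) - 1).toNat = 8 * m + 3 := by omega
    rw [e1, e2, pvN5]; push_cast; ring

theorem pvI3 (k : Int) : PySem.Int.bxor (8 * k + 1) (8 * k + 3) = 2 := by
  by_cases hk : 0 ≤ k
  · obtain ⟨n, rfl⟩ : ∃ n : Nat, k = (n : Int) := ⟨k.toNat, by omega⟩
    have e1 : (8 * (n : Int) + 1) = ((8 * n + 1 : Nat) : Int) := by push_cast; ring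
    have e2 : (8 * (n : Int) + 3) = ((8 * n + 3 : Nat) : Int) := by push_cast; ring
    rw [e2, e1, PySem.Int.bxor_natCast, pvN3]
    norm_num
  · obtain ⟨m, rfl⟩ : ∃ m : Nat, k = -((m : Int) + 1) := ⟨(-k - 1).toNat, by omega⟩
    unfold PySem.Int.bxor
    rw [if_neg (by omega), if_neg (by omega)]
    have e1 : (-(8 * -((m : Int) + 1) + 1) - 1).toNat = 8 * m + 6 := by omega
    have e2 : (-(8 * -((m : Int) + 1) + 3) - 1).toNat = 8 * m + 4 := by omega
    rw [e1, e2, pvN8]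
    norm_num

theorem pvI4 (k : Int) : PySem.Int.bxor 2 (8 * k + 5) = 8 * k + 7 := by
  by_cases hk : 0 ≤ k
  · obtain ⟨n, rfl⟩ : ∃ n : Nat, k = (n : Int) := ⟨k.toNat, by omega⟩
    have e1 : (2 : Int) = ((2 : Nat) : Int) := by norm_num
    have e2 : (8 * (n : Int) + 5) = ((8 * n + 5 : Nat) : Int) := by push_cast; ring
    rw [e2, e1, PySem.Int.bxor_natCast, pvN4]; push_cast; ring
  · obtain ⟨m, rfl⟩ : ∃ m : Nat, k = -((m : Int) + 1) := ⟨(-k - 1).toNat, by omega⟩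
    unfold PySem.Int.bxor
    rw [if_pos (by omega), if_neg (by omega)]
    have e1 : (2 : Int).toNat = 2 := by decide
    have e2 : (-(8 * -((m : Int) + 1) + 5) - 1).toNat = 8 * m + 2 := by omega
    rw [e1, e2, pvN7]; push_cast; ring

-- range expansion: pyRange a (a+r+1) 1 for r = 0,1,2,3
theorem pvR0 (a : Int) : PySem.List.pyRange a (a + 0 + 1) 1 = [a] := by
  rw [show a + 0 + 1 = a + 1 by ring, PySem.List.pyRange_one_singleton]

theorem pvR1 (a : Int) : PySem.List.pyRange a (a + 1 + 1) 1 = [a, a + 1] := by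
  rw [PySem.List.pyRange_one_cons (by omega),
      show a + 1 + 1 = (a + 1) + 1 by ring, PySem.List.pyRange_one_singleton]

theorem pvR2 (a : Int) : PySem.List.pyRange a (a + 2 + 1) 1 = [a, a + 1, a + 2] := by
  rw [show a + 2 + 1 = a + 3 by ring, PySem.List.pyRange_one_cons (by omega),
      PySem.List.pyRange_one_cons (by omega), show a + 1 + 1 = a + 2 by ring,
      show a + 3 = a + 2 + 1 by ring, PySem.List.pyRange_one_singleton]

theorem pvR3 (a : Int) : PySem.List.pyRange a (a + 3 + 1) 1 = [a, a + 1, a + 2, a + 3] := by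
  rw [show a + 3 + 1 = a + 4 by ring, PySem.List.pyRange_one_cons (by omega),
      PySem.List.pyRange_one_cons (by omega), show a + 1 + 1 = a + 2 by ring,
      PySem.List.pyRange_one_cons (by omega), show a + 2 + 1 = a + 3 by ring,
      show a + 4 = a + 3 + 1 by ring, PySem.List.pyRange_one_singleton]

-- ===== VERDICT (by name: the statement is the Claim_ definition above) =====
theorem calc_py_spec : Claim_equal_calc_py := by
  intro x _
  unfold Spec_calc_py
  by_cases hx : PySem.Int.mod x 2 = 0
  · -- even branch
    simp only [calc_py, calc_py_alt, hx, if_pos]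
    set m := PySem.Int.floordiv x 2 with hm
    set q := PySem.Int.floordiv m 4 with hq
    have hqr : q * 4 + PySem.Int.mod m 4 = m := PySem.Int.floordiv_mul_add_mod m 4
    have hr0 : 0 ≤ PySem.Int.mod m 4 := PySem.Int.mod_nonneg m (by norm_num)
    have hr4 : PySem.Int.mod m 4 < 4 := PySem.Int.mod_lt m (by norm_num)
    unfold pv_g
    have hr : PySem.Int.mod m 4 = 0 ∨ PySem.Int.mod m 4 = 1 ∨
        PySem.Int.mod m 4 = 2 ∨ PySem.Int.mod m 4 = 3 := by omega
    rcases hr with h | h | h | h <;> rw [h] at hqr ⊢ <;> simp only []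
    · rw [pvR0, List.foldl_cons, List.foldl_nil, pv_zero_bxor]
      norm_num; omega
    · rw [pvR1, List.foldl_cons, List.foldl_cons, List.foldl_nil, pv_zero_bxor,
          show 2 * (q * 4) = 8 * q by ring, show 2 * (q * 4 + 1) = 8 * q + 2 by ring, pvI1]
      norm_num
    · rw [pvR2, List.foldl_cons, List.foldl_cons, List.foldl_cons, List.foldl_nil, pv_zero_bxor,
          show 2 * (q * 4) = 8 * q by ring, show 2 * (q * 4 + 1) = 8 * q + 2 by ring, pvI1,
          show 2 * (q * 4 + 2) = 8 * q + 4 by ring, pvI2]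
      norm_num; omega
    · rw [pvR3, List.foldl_cons, List.foldl_cons, List.foldl_cons, List.foldl_cons,
          List.foldl_nil, pv_zero_bxor,
          show 2 * (q * 4) = 8 * q by ring, show 2 * (q * 4 + 1) = 8 * q + 2 by ring, pvI1,
          show 2 * (q * 4 + 2) = 8 * q + 4 by ring, pvI2,
          show 2 * (q * 4 + 3) = 8 * q + 6 by ring, PySem.Int.bxor_self]
      norm_num
  · -- odd branch
    simp only [calc_py, calc_py_alt, hx, if_false]
    set u := PySem.Int.floordiv (x - 1) 2 with hu
    set q := PySem.Int.floordiv u 4 with hq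
    have hqr : q * 4 + PySem.Int.mod u 4 = u := PySem.Int.floordiv_mul_add_mod u 4
    have hr0 : 0 ≤ PySem.Int.mod u 4 := PySem.Int.mod_nonneg u (by norm_num)
    have hr4 : PySem.Int.mod u 4 < 4 := PySem.Int.mod_lt u (by norm_num)
    unfold pv_g
    have hr : PySem.Int.mod u 4 = 0 ∨ PySem.Int.mod u 4 = 1 ∨
        PySem.Int.mod u 4 = 2 ∨ PySem.Int.mod u 4 = 3 := by omega
    rcases hr with h | h | h | h <;> rw [h] at hqr ⊢ <;> simp only []
    · rw [pvR0, List.foldl_cons, List.foldl_nil, pv_zero_bxor]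
      norm_num
      omega
    · rw [pvR1, List.foldl_cons, List.foldl_cons, List.foldl_nil, pv_zero_bxor,
          show 2 * (q * 4) + 1 = 8 * q + 1 by ring,
          show 2 * (q * 4 + 1) + 1 = 8 * q + 3 by ring, pvI3]
      norm_num
    · rw [pvR2, List.foldl_cons, List.foldl_cons, List.foldl_cons, List.foldl_nil, pv_zero_bxor,
          show 2 * (q * 4) + 1 = 8 * q + 1 by ring,
          show 2 * (q * 4 + 1) + 1 = 8 * q + 3 by ring, pvI3,
          show 2 * (q * 4 + 2) + 1 = 8 * q + 5 by ring, pvI4]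
      norm_num
      omega
    · rw [pvR3, List.foldl_cons, List.foldl_cons, List.foldl_cons, List.foldl_cons,
          List.foldl_nil, pv_zero_bxor,
          show 2 * (q * 4) + 1 = 8 * q + 1 by ring,
          show 2 * (q * 4 + 1) + 1 = 8 * q + 3 by ring, pvI3,
          show 2 * (q * 4 + 2) + 1 = 8 * q + 5 by ring, pvI4,
          show 2 * (q * 4 + 3) + 1 = 8 * q + 7 by ring, PySem.Int.bxor_self]
      norm_num
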